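-- pv_equiv track=rewrite | github.com/rajeevrj256/100daysofcode | day1/answer.py | winnerOfGame
-- ===== SOURCE A (Python) =====
-- def winnerOfGame(colors):
--     """
--     :type colors: str
--     :rtype: bool
--     """
--     if len(colors)<=2:
--         return False
--     acount=0
--     bcount=0
--     n=len(colors)
--
--     for i in range(1,n-1):
--         if colors[i - 1] == 'A' and colors[i] == 'A' and colors[i + 1] == 'A':
--            acount=acount+1
--         if colors[i-1] == 'B' and colors[i] == 'B' and colors[i+1] == 'B':
--             bcount=bcount+1
--
--
--     return acount>bcount
-- ===== SOURCE B (Python) =====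
-- def winnerOfGame(colors):
--     """
--     :type colors: str
--     :rtype: bool
--     """
--     acount = 0
--     bcount = 0
--     run = 0
--     prev = None
--     for c in colors:
--         if c == prev:
--             run += 1
--         else:
--             run = 1
--             prev = c
--         if run >= 3:
--             if c == 'A':
--                 acount += 1
--             elif c == 'B':
--                 bcount += 1
--     return acount > bcount
-- ===== Notes on version B (the rewrite author's own statement) =====
-- stated objective: simpler
-- what changed: Replaces the indexed sliding-window scan over range(1, n-1) with three subscript lookups per step by a single run-length streak pass over the characters (no indexing, no special case for short strings).
import Mathlib
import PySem

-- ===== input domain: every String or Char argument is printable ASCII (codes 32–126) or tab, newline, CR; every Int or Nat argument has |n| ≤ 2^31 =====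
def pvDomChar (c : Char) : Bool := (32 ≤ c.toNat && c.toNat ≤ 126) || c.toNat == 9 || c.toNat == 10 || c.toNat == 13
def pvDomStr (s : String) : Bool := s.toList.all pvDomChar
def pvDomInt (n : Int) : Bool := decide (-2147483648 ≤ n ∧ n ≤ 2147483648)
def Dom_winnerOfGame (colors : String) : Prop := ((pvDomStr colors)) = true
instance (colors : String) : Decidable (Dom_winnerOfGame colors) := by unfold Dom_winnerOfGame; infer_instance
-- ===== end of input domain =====

-- B replaces A's indexed sliding-window scan by a single run-length streak pass (simpler; same return value).

-- ===== PORT A =====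
-- indices i-1, i, i+1 are always in range for i ∈ range(1, n-1), so pyGetD is exact here
def winnerOfGame (colors : String) : Bool :=
  if PySem.Str.len colors ≤ 2 then false
  else
    let l := colors.toList
    let n : Int := PySem.Str.len colors
    let st := (PySem.List.pyRange 1 (n - 1) 1).foldl
      (fun (st : Int × Int) i =>
        let ac := if PySem.List.pyGetD l (i - 1) ' ' = 'A' ∧ PySem.List.pyGetD l i ' ' = 'A' ∧
                     PySem.List.pyGetD l (i + 1) ' ' = 'A' then st.1 + 1 else st.1
        let bc := if PySem.List.pyGetD l (i - 1) ' ' = 'B' ∧ PySem.List.pyGetD l i ' ' = 'B' ∧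
                     PySem.List.pyGetD l (i + 1) ' ' = 'B' then st.2 + 1 else st.2
        (ac, bc)) (0, 0)
    decide (st.1 > st.2)

-- ===== PORT B =====
def altLoop : List Char → Option Char → Int → Int → Int → Int × Int
  | [], _, _, a, b => (a, b)
  | c :: rest, prev, run, a, b =>
    let pr : Int × Option Char := if some c = prev then (run + 1, prev) else (1, some c)
    let ab : Int × Int :=
      if pr.1 ≥ 3 then
        (if c = 'A' then (a + 1, b) else if c = 'B' then (a, b + 1) else (a, b))
      else (a, b)
    altLoop rest pr.2 pr.1 ab.1 ab.2

def winnerOfGame_alt (colors : String) : Bool :=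
  let st := altLoop colors.toList none 0 0 0
  decide (st.1 > st.2)

-- ===== PRECONDITION & SPEC =====
def Spec_winnerOfGame (colors : String) (out : Bool) : Prop := out = winnerOfGame_alt colors
instance (colors : String) (out : Bool) : Decidable (Spec_winnerOfGame colors out) := by unfold Spec_winnerOfGame; infer_instance

-- ===== CLAIM (what is proved, stated in full; the proofs are below) =====
def Claim_equal_winnerOfGame : Prop := ∀ (colors : String), Dom_winnerOfGame colors → Spec_winnerOfGame colors (winnerOfGame colors)

-- ===== LEMMAS AND PROOFS =====

-- number of length-3 all-`c` windows in x :: y :: zs whose first element is x, y, or inside zs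
def ref (c : Char) : Char → Char → List Char → Int
  | _, _, [] => 0
  | x, y, z :: zs => (if x = c ∧ y = c ∧ z = c then 1 else 0) + ref c y z zs

theorem ref_fresh (c x y z : Char) (zs : List Char) (h : x ≠ y) :
    ref c x y (z :: zs) = ref c y z zs := by
  have : ¬ (x = c ∧ y = c ∧ z = c) := by rintro ⟨h1, h2, _⟩; exact h (h1.trans h2.symm)
  simp [ref, this]

theorem altLoop_eq_ref : ∀ (l : List Char) (x y : Char) (r a b : Int),
    1 ≤ r → (2 ≤ r ↔ x = y) →
    altLoop l (some y) r a b = (a + ref 'A' x y l, b + ref 'B' x y l) := by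
  intro l
  induction l with
  | nil => intro x y r a b _ _; simp [altLoop, ref]
  | cons z zs ih =>
    intro x y r a b hr hxy
    by_cases hzy : z = y
    · subst hzy
      have h2 : 2 ≤ r + 1 ↔ z = z := by simp; omega
      by_cases hfire : 2 ≤ r
      · have hx : x = z := hxy.mp hfire
        subst hx
        have h3 : (r + 1 : Int) ≥ 3 := by omega
        by_cases hA : x = 'A'
        · subst hA
          have hstep : altLoop ('A' :: zs) (some 'A') r a b
              = altLoop zs (some 'A') (r + 1) (a + 1) b := by
            simp [altLoop, h3]
          rw [hstep, ih 'A' 'A' (r+1) _ _ (by omega) h2]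
          simp [ref]
          ring
        · by_cases hB : x = 'B'
          · subst hB
            have hstep : altLoop ('B' :: zs) (some 'B') r a b
                = altLoop zs (some 'B') (r + 1) a (b + 1) := by
              simp [altLoop, h3]
            rw [hstep, ih 'B' 'B' (r+1) _ _ (by omega) h2]
            simp [ref, hA]
            ring
          · have hstep : altLoop (x :: zs) (some x) r a b
                = altLoop zs (some x) (r + 1) a b := by
              simp [altLoop, h3, hA, hB]
            rw [hstep, ih x x (r+1) _ _ (by omega) h2]
            simp [ref, hA, hB]
      · have hx : x ≠ z := fun h => hfire (hxy.mpr h)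
        have h3 : ¬ ((r + 1 : Int) ≥ 3) := by omega
        have hstep : altLoop (z :: zs) (some z) r a b
            = altLoop zs (some z) (r + 1) a b := by
          simp [altLoop, h3]
        rw [hstep, ih z z (r+1) _ _ (by omega) h2]
        simp [ref]
        exact ⟨fun h1 h2' => hx (h1.trans h2'.symm), fun h1 h2' => hx (h1.trans h2'.symm)⟩
    · have h2 : 2 ≤ (1 : Int) ↔ y = z := by
        constructor
        · intro h; omega
        · intro h; exact absurd h.symm hzy
      have h3 : ¬ ((1 : Int) ≥ 3) := by omega
      have hstep : altLoop (z :: zs) (some y) r a b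
          = altLoop zs (some z) 1 a b := by
        simp [altLoop, h3, hzy]
      rw [hstep, ih y z 1 _ _ (by omega) h2]
      have hAx : ¬ (x = 'A' ∧ y = 'A' ∧ z = 'A') := by
        rintro ⟨_, h1, h2'⟩; exact hzy (h2'.trans h1.symm)
      have hBx : ¬ (x = 'B' ∧ y = 'B' ∧ z = 'B') := by
        rintro ⟨_, h1, h2'⟩; exact hzy (h2'.trans h1.symm)
      simp [ref, if_neg hAx, if_neg hBx]

-- A's indexed fold, as a generic statement about any list `big` whose k-drop is x :: y :: zs
theorem foldA_eq_ref (c : Char) :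
    ∀ (zs : List Char) (x y : Char) (big : List Char) (k : Nat) (a : Int),
    big.drop k = x :: y :: zs →
    (PySem.List.pyRange ((k : Int) + 1) ((big.length : Int) - 1) 1).foldl
      (fun acc i => if PySem.List.pyGetD big (i - 1) ' ' = c ∧ PySem.List.pyGetD big i ' ' = c ∧
                       PySem.List.pyGetD big (i + 1) ' ' = c then acc + 1 else acc) a
    = a + ref c x y zs := by
  intro zs
  induction zs with
  | nil =>
    intro x y big k a hdrop
    have hlen : big.length = k + 2 := by
      have := congrArg List.length hdrop
      simp at this; omega
    rw [PySem.List.pyRange_one_eq_nil (by omega)]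
    simp [ref]
  | cons z zt ih =>
    intro x y big k a hdrop
    have hlen : big.length = k + 3 + zt.length := by
      have := congrArg List.length hdrop
      simp at this; omega
    have hk : big[k]? = some x := by
      have : (big.drop k)[0]? = some x := by rw [hdrop]; rfl
      simpa using this
    have hk1 : big[k+1]? = some y := by
      have : (big.drop k)[1]? = some y := by rw [hdrop]; rfl
      simpa using this
    have hk2 : big[k+2]? = some z := by
      have : (big.drop k)[2]? = some z := by rw [hdrop]; rfl
      simpa using this
    rw [PySem.List.pyRange_one_cons (by omega)]
    simp only [List.foldl_cons]
    have e0 : PySem.List.pyGetD big ((k : Int) + 1 - 1) ' ' = x := by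
      have : ((k : Int) + 1 - 1) = ((k : Nat) : Int) := by ring
      rw [this, PySem.List.pyGetD_natCast]
      simp [List.getD, hk]
    have e1 : PySem.List.pyGetD big ((k : Int) + 1) ' ' = y := by
      have : ((k : Int) + 1) = (((k + 1 : Nat)) : Int) := by push_cast; ring
      rw [this, PySem.List.pyGetD_natCast]
      simp [List.getD, hk1]
    have e2 : PySem.List.pyGetD big ((k : Int) + 1 + 1) ' ' = z := by
      have : ((k : Int) + 1 + 1) = (((k + 2 : Nat)) : Int) := by push_cast; ring
      rw [this, PySem.List.pyGetD_natCast]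
      simp [List.getD, hk2]
    have hdrop' : big.drop (k + 1) = y :: z :: zt := by
      have := congrArg (List.drop 1) hdrop
      simpa [List.drop_drop, Nat.add_comm] using this
    have hcast : ((k : Int) + 1 + 1) = (((k + 1 : Nat) : Int) + 1) := by push_cast; ring
    rw [e0, e1, e2]
    rw [show (PySem.List.pyRange ((k : Int) + 1 + 1) ((big.length : Int) - 1) 1)
        = (PySem.List.pyRange (((k + 1 : Nat) : Int) + 1) ((big.length : Int) - 1) 1) by rw [hcast]]
    rw [ih y z big (k + 1) _ hdrop']
    simp only [ref]
    split_ifs with h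
    · ring
    · ring

-- B's loop on a short list (length ≤ 2) never fires
theorem altLoop_short (l : List Char) (h : l.length ≤ 2) :
    altLoop l none 0 0 0 = (0, 0) := by
  match l, h with
  | [], _ => rfl
  | [c], _ =>
    simp [altLoop, show ¬ ((1:Int) ≥ 3) by omega]
  | [c, d], _ =>
    by_cases hdc : some d = some c
    · simp [altLoop, hdc, show ¬ ((1:Int) ≥ 3) by omega]
    · simp [altLoop, hdc, show ¬ ((1:Int) ≥ 3) by omega]

-- the pair fold splits into two independent folds
theorem fold_pair (ra : List Int) (fA fB : Int → Int → Int) (a b : Int) :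
    ra.foldl (fun (st : Int × Int) i => (fA st.1 i, fB st.2 i)) (a, b)
    = (ra.foldl fA a, ra.foldl fB b) := by
  induction ra generalizing a b with
  | nil => rfl
  | cons i ra ih => simp [List.foldl_cons, ih]

-- ===== VERDICT (by name: the statement is the Claim_ definition above) =====
theorem winnerOfGame_spec : Claim_equal_winnerOfGame := by
  intro colors _
  unfold Spec_winnerOfGame winnerOfGame winnerOfGame_alt
  by_cases hshort : PySem.Str.len colors ≤ 2
  · rw [if_pos hshort]
    have hl : colors.toList.length ≤ 2 := by
      have := PySem.Str.len_eq colors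
      omega
    rw [altLoop_short colors.toList hl]
    simp
  · rw [if_neg hshort]
    have hlen : 3 ≤ colors.toList.length := by
      have := PySem.Str.len_eq colors
      omega
    obtain ⟨x, y, z, zs, hxl⟩ : ∃ x y z zs, colors.toList = x :: y :: z :: zs := by
      match hm : colors.toList, hlen with
      | x :: y :: z :: zs, _ => exact ⟨x, y, z, zs, rfl⟩
    simp only [hxl]
    rw [fold_pair _
      (fun a i => if PySem.List.pyGetD (x :: y :: z :: zs) (i - 1) ' ' = 'A' ∧
          PySem.List.pyGetD (x :: y :: z :: zs) i ' ' = 'A' ∧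
          PySem.List.pyGetD (x :: y :: z :: zs) (i + 1) ' ' = 'A' then a + 1 else a)
      (fun b i => if PySem.List.pyGetD (x :: y :: z :: zs) (i - 1) ' ' = 'B' ∧
          PySem.List.pyGetD (x :: y :: z :: zs) i ' ' = 'B' ∧
          PySem.List.pyGetD (x :: y :: z :: zs) (i + 1) ' ' = 'B' then b + 1 else b)]
    have hA := foldA_eq_ref 'A' (z :: zs) x y (x :: y :: z :: zs) 0 0 rfl
    have hB := foldA_eq_ref 'B' (z :: zs) x y (x :: y :: z :: zs) 0 0 rfl
    norm_num at hA hB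
    have hlen' : PySem.Str.len colors = ((x :: y :: z :: zs).length : Int) := by
      rw [PySem.Str.len_eq, hxl]
    rw [hlen']
    rw [show (((x :: y :: z :: zs).length : Int) - 1) = ((zs.length : Int) + 1 + 1) by
      simp]
    rw [hA, hB]
    -- B side
    set x0 : Char := if x = 'A' then 'B' else 'A' with hx0
    have hx0ne : x0 ≠ x := by
      rw [hx0]; split_ifs with h
      · rw [h]; decide
      · exact fun he => h he.symm
    have hstep : altLoop (x :: y :: z :: zs) none 0 0 0
        = altLoop (y :: z :: zs) (some x) 1 0 0 := by
      simp [altLoop, show ¬ ((1:Int) ≥ 3) by omega]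
    have halt := altLoop_eq_ref (y :: z :: zs) x0 x 1 0 0 (by omega)
      (by constructor
          · intro h; omega
          · intro h; exact absurd h hx0ne)
    rw [hstep, halt, ref_fresh 'A' x0 x y (z :: zs) hx0ne,
        ref_fresh 'B' x0 x y (z :: zs) hx0ne]
    simp
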